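-- pv_equiv track=rewrite | github.com/anggerdeni/NTRU-dart | security_testing/main.py | check_if_f_found
-- ===== SOURCE A (Python) =====
-- def check_if_f_found(f, mtx_lll):
--        l = len(f)
--        mtx = [[int(y) for y in x[:l]] for x in mtx_lll]
--
--        for row in mtx:
--               tmp_row = row
--               for i in range(l):
--                      if(tmp_row == f):
--                             return True
--                      tmp_row = [tmp_row[-1]] + tmp_row[:-1]
--        return False
-- ===== SOURCE B (Python) =====
-- def check_if_f_found(f, mtx_lll):
--     # Doubling trick: f is a cyclic rotation of r (len l) iff f occurs as a
--     # contiguous window of r+r starting at some offset 0 <= i < l.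
--     l = len(f)
--     for row in mtx_lll:
--         r = [int(y) for y in row[:l]]
--         if len(r) != l:
--             continue
--         d = r + r
--         for i in range(l):
--             if d[i:i+l] == f:
--                 return True
--     return False
-- ===== Notes on version B (the rewrite author's own statement) =====
-- stated objective: faster
-- what changed: B replaces A's repeated right-rotation of each row (building a fresh rotated list and comparing it every step) by the doubling trick: each row is doubled once and f is compared against the l contiguous windows of row+row, and rows whose truncation has the wrong length are skipped immediately instead of being rotated l times.
-- outside the precondition, e.g. on check_if_f_found([1], [[1], []]): A returns True, B returns True; on check_if_f_found([1], [[], [1]]): A raises IndexError, B returns True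
import Mathlib
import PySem

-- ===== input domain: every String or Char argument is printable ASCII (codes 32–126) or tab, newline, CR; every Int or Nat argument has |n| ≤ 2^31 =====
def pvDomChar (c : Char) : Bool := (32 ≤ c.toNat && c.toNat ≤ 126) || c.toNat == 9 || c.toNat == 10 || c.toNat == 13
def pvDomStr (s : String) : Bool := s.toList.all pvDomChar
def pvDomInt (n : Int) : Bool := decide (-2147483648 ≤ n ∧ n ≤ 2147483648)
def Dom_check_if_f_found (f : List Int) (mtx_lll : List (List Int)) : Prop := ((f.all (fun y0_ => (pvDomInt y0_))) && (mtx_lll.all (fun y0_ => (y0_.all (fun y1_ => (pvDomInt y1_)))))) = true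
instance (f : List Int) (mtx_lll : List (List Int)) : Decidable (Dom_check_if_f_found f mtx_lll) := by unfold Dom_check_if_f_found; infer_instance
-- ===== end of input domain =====

-- B replaces A's repeated right-rotation of each row by the doubling trick (compare f
-- against the l windows of row+row, skipping rows of the wrong length); measured faster in a timing run.

-- ===== PORT A =====
-- tmp_row = [tmp_row[-1]] + tmp_row[:-1]; tmp_row[-1] raises IndexError on an empty
-- tmp_row — that input is excluded by Pre_; the port leaves tmp_row unchanged there.
def pvRotA (tmp : List Int) : List Int :=
  match PySem.List.pyGet? tmp (-1) with
  | some v => v :: PySem.List.slice tmp none (some (-1))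
  | none => tmp

-- 'for i in range(l): if tmp_row == f: return True; tmp_row = …' as structural recursion on the counter
def pvInnerA (f : List Int) : Nat → List Int → Bool
  | 0, _ => false
  | n+1, tmp => if tmp = f then true else pvInnerA f n (pvRotA tmp)

-- 'for row in mtx: … return True … / return False'
def pvLoopA (f : List Int) (l : Nat) : List (List Int) → Bool
  | [] => false
  | row :: rest => if pvInnerA f l row then true else pvLoopA f l rest

def check_if_f_found (f : List Int) (mtx_lll : List (List Int)) : Bool :=
  let l := f.length
  -- mtx = [[int(y) for y in x[:l]] for x in mtx_lll]  (int(y) is the identity on ints)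
  let mtx := mtx_lll.map (fun x => (PySem.List.slice x none (some (l : Int))).map (fun y => y))
  pvLoopA f l mtx

-- ===== PORT B =====
def pvRowB (f : List Int) (l : Nat) (row : List Int) : Bool :=
  let r := (PySem.List.slice row none (some (l : Int))).map (fun y => y)
  if r.length ≠ l then false
  else
    let d := r ++ r
    -- d[i:i+l] == f for i in range(l)
    (List.range l).any (fun i => PySem.List.slice d (some (i : Int)) (some ((i : Int) + (l : Int))) == f)

def check_if_f_found_alt (f : List Int) (mtx_lll : List (List Int)) : Bool :=
  mtx_lll.any (pvRowB f f.length)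

-- ===== PRECONDITION & SPEC =====
-- Pre_ excludes inputs where f is nonempty and some row of the matrix is empty: there
-- A's 'tmp_row[-1]' raises IndexError unless an earlier row already matched, so A's
-- behaviour on that whole family is exception-or-accident; B returns the natural answer.
def Pre_check_if_f_found (f : List Int) (mtx_lll : List (List Int)) : Prop :=
  f = [] ∨ ∀ row ∈ mtx_lll, row ≠ []
instance (f : List Int) (mtx_lll : List (List Int)) : Decidable (Pre_check_if_f_found f mtx_lll) := by
  unfold Pre_check_if_f_found; infer_instance

def pvWitness_check_if_f_found : List Int × List (List Int) := ([1, 2], [[3, 4], [2, 1]])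

def Spec_check_if_f_found (f : List Int) (mtx_lll : List (List Int)) (out : Bool) : Prop := out = check_if_f_found_alt f mtx_lll
instance (f : List Int) (mtx_lll : List (List Int)) (out : Bool) : Decidable (Spec_check_if_f_found f mtx_lll out) := by unfold Spec_check_if_f_found; infer_instance

-- ===== CLAIM (what is proved, stated in full; the proofs are below) =====
def Claim_equal_check_if_f_found : Prop := ∀ (f : List Int) (mtx_lll : List (List Int)), Dom_check_if_f_found f mtx_lll → Pre_check_if_f_found f mtx_lll → Spec_check_if_f_found f mtx_lll (check_if_f_found f mtx_lll)

-- ===== LEMMAS AND PROOFS =====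

-- one rotation step, on a nonempty list, moves the last element to the front
theorem pvRotA_eq (xs : List Int) (h : xs ≠ []) :
    pvRotA xs = xs.getLast h :: xs.dropLast := by
  unfold pvRotA
  rw [PySem.List.pyGet?_neg_one, PySem.List.slice_to_neg_one,
      List.getLast?_eq_some_getLast h]

-- one rotation step preserves the length
theorem pvRotA_length (tmp : List Int) : (pvRotA tmp).length = tmp.length := by
  cases tmp with
  | nil => rfl
  | cons x xs =>
      rw [pvRotA_eq _ (by simp)]
      simp

-- a row of the wrong length never matches, however often it is rotated
theorem pvInnerA_of_ne_length (f : List Int) (n : Nat) (tmp : List Int)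
    (h : tmp.length ≠ f.length) : pvInnerA f n tmp = false := by
  induction n generalizing tmp with
  | zero => rfl
  | succ n ih =>
      unfold pvInnerA
      rw [if_neg (by intro he; exact h (he ▸ rfl))]
      exact ih _ (by rw [pvRotA_length]; exact h)

-- the inner loop of A is an existential over iterated rotations
theorem pvInnerA_iff (f : List Int) (n : Nat) (tmp : List Int) :
    pvInnerA f n tmp = true ↔ ∃ i < n, pvRotA^[i] tmp = f := by
  induction n generalizing tmp with
  | zero => simp [pvInnerA]
  | succ n ih =>
      unfold pvInnerA
      by_cases h : tmp = f
      · rw [if_pos h]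
        refine ⟨fun _ => ⟨0, Nat.succ_pos n, by simpa using h⟩, fun _ => rfl⟩
      · rw [if_neg h, ih]
        constructor
        · rintro ⟨i, hi, he⟩
          exact ⟨i + 1, by omega, by rwa [Function.iterate_succ_apply]⟩
        · rintro ⟨i, hi, he⟩
          cases i with
          | zero => exact absurd (by simpa using he) h
          | succ i => exact ⟨i, by omega, by rwa [Function.iterate_succ_apply] at he⟩

-- one step of A's rotation, on a block-rotated list
theorem pvRotA_rot (r : List Int) (k : Nat) (hk1 : 1 ≤ k) (hk2 : k ≤ r.length) :
    pvRotA (r.drop k ++ r.take k) = r.drop (k - 1) ++ r.take (k - 1) := by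
  have hk1' : k - 1 < r.length := by omega
  have hrne : r ≠ [] := by intro hcon; subst hcon; simp at hk2; omega
  have htake : r.take k = r.take (k - 1) ++ [r[k - 1]] := by
    have hk : k = (k - 1) + 1 := by omega
    conv_lhs => rw [hk]
    rw [List.take_add_one, List.getElem?_eq_getElem hk1']
    simp
  have htk : r.take k ≠ [] := by
    intro h
    rcases List.take_eq_nil_iff.mp h with h' | h'
    · omega
    · exact hrne h'
  have hne : r.drop k ++ r.take k ≠ [] := by simp [htk]
  have hdrop : r.drop (k - 1) = r[k - 1] :: r.drop k := by
    have hk' : k - 1 + 1 = k := by omega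
    rw [List.drop_eq_getElem_cons hk1', hk']
  have hlast : (r.take k).getLast htk = r[k - 1] := by
    rw [List.getLast_eq_getElem]
    have hlt : (r.take k).length = k := by simp; omega
    simp [List.getElem_take, hlt]
  have hdlast : (r.take k).dropLast = r.take (k - 1) := by
    rw [htake, List.dropLast_concat]
  rw [pvRotA_eq _ hne, List.getLast_append_of_ne_nil hne htk,
      List.dropLast_append_of_ne_nil htk, hlast, hdlast, hdrop]
  simp

-- i iterations of A's rotation = block rotation by (len - i)
theorem pvRotA_iter (r : List Int) (i : Nat) (hi : i ≤ r.length) :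
    pvRotA^[i] r = r.drop (r.length - i) ++ r.take (r.length - i) := by
  induction i with
  | zero => simp
  | succ i ih =>
      rw [Function.iterate_succ_apply', ih (by omega),
          pvRotA_rot r (r.length - i) (by omega) (by omega)]
      have h1 : r.length - i - 1 = r.length - (i + 1) := by omega
      rw [h1]

-- the window d[i:i+l] of d = r ++ r is the block rotation by i
theorem window_eq (r : List Int) (i : Nat) (hi : i ≤ r.length) :
    ((r ++ r).drop i).take r.length = r.drop i ++ r.take i := by
  rw [List.drop_append_of_le_length hi, List.take_append,
      List.take_of_length_le (by simp)]
  have h1 : r.length - (r.drop i).length = i := by simp; omega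
  rw [h1]

-- per-row equivalence: A's rotation loop on row[:l] = B's window scan
theorem row_eq (f row : List Int) :
    pvInnerA f f.length ((PySem.List.slice row none (some (f.length : Int))).map (fun y => y))
      = pvRowB f f.length row := by
  unfold pvRowB
  rw [PySem.List.slice_to_natCast]
  set l := f.length with hl
  set r := (row.take l).map (fun y => y) with hr
  by_cases hlen : r.length = l
  · rw [if_neg (by omega)]
    rcases Nat.eq_zero_or_pos l with h0 | hpos
    · rw [h0]
      simp [pvInnerA]
    · rw [Bool.eq_iff_iff, pvInnerA_iff, List.any_eq_true]
      simp only [List.mem_range, PySem.List.slice_natCast_add, beq_iff_eq]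
      have hwin : ∀ i : Nat, i ≤ l → ((r ++ r).drop i).take l = r.drop i ++ r.take i := by
        intro i hi
        rw [← hlen]
        exact window_eq r i (by omega)
      constructor
      · rintro ⟨i, hi, he⟩
        rw [pvRotA_iter r i (by omega), hlen] at he
        rcases Nat.eq_zero_or_pos i with h0 | hip
        · refine ⟨0, hpos, ?_⟩
          rw [hwin 0 (by omega)]
          subst h0
          simp only [Nat.sub_zero] at he
          rw [← hlen, List.drop_length, List.nil_append, List.take_length] at he
          simpa using he
        · refine ⟨l - i, by omega, ?_⟩
          rw [hwin (l - i) (by omega)]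
          exact he
      · rintro ⟨i, hi, he⟩
        rw [hwin i (by omega)] at he
        rcases Nat.eq_zero_or_pos i with h0 | hip
        · refine ⟨0, hpos, ?_⟩
          subst h0
          simpa using he
        · refine ⟨l - i, by omega, ?_⟩
          rw [pvRotA_iter r (l - i) (by omega), hlen]
          have h2 : l - (l - i) = i := by omega
          rw [h2]
          exact he
  · rw [if_pos (by omega)]
    exact pvInnerA_of_ne_length f l r (by omega)

-- the outer loops agree row by row
theorem loop_eq (f : List Int) (mtx : List (List Int)) :
    pvLoopA f f.length (mtx.map (fun x => (PySem.List.slice x none (some (f.length : Int))).map (fun y => y)))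
      = mtx.any (pvRowB f f.length) := by
  induction mtx with
  | nil => rfl
  | cons row rest ih =>
      simp only [List.map_cons, List.any_cons]
      unfold pvLoopA
      rw [row_eq f row, ih]
      cases pvRowB f f.length row <;> simp

-- ===== VERDICT (by name: the statement is the Claim_ definition above) =====
theorem check_if_f_found_spec : Claim_equal_check_if_f_found := by
  intro f mtx _ _
  unfold Spec_check_if_f_found check_if_f_found check_if_f_found_alt
  exact loop_eq f mtx
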